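-- pv_equiv track=rewrite | github.com/vangelot/01_SS_HomeTasks | 14_Trees/Trees.py | levels_detect
-- ===== SOURCE A (Python) =====
-- def levels_detect(num_of_values):
--     levels = 0
--     rest = num_of_values - 2
--     levels = 1
--     while rest > 0:
--         levels += 1
--         rest = rest - 2**levels
--     return levels
-- ===== SOURCE B (Python) =====
-- def levels_detect(num_of_values):
--     # closed form: smallest L >= 1 with num_of_values <= 2**(L+1) - 2
--     if num_of_values <= 2:
--         return 1
--     return (num_of_values + 1).bit_length() - 1
-- ===== Notes on version B (the rewrite author's own statement) =====
-- stated objective: simpler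
-- what changed: Replaces the subtract-powers-of-two while loop with a branch-free closed form computed via integer bit_length.
import Mathlib
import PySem

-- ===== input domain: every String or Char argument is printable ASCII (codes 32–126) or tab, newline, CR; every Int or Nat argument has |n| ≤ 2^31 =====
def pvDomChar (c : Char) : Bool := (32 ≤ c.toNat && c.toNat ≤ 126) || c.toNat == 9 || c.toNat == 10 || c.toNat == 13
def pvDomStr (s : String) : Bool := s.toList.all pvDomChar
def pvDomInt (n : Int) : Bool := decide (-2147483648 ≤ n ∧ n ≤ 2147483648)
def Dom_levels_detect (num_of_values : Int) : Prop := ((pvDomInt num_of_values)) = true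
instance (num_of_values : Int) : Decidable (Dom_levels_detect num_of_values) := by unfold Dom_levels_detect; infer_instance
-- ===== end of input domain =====

-- B replaces A's subtract-powers-of-two loop with a closed form via integer bit_length (simpler; no loop).


-- ===== PORT A =====
-- A's while loop: levels += 1; rest -= 2**levels, until rest <= 0.
def levelsLoop (rest levels : Int) : Int :=
  if h : rest > 0 then
    levelsLoop (rest - 2 ^ (levels + 1).toNat) (levels + 1)
  else
    levels
termination_by rest.toNat
decreasing_by
  have hp : (0 : Int) < 2 ^ (levels + 1).toNat := pow_pos (by norm_num) _
  omega

def levels_detect (num_of_values : Int) : Int :=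
  levelsLoop (num_of_values - 2) 1

-- ===== PORT B =====
-- (num_of_values + 1).bit_length() ported as PySem.Int.bitLength.
def levels_detect_alt (num_of_values : Int) : Int :=
  if num_of_values ≤ 2 then 1
  else (PySem.Int.bitLength (num_of_values + 1) : Int) - 1

-- ===== PRECONDITION & SPEC =====
def Spec_levels_detect (num_of_values : Int) (out : Int) : Prop := out = levels_detect_alt num_of_values
instance (num_of_values : Int) (out : Int) : Decidable (Spec_levels_detect num_of_values out) := by unfold Spec_levels_detect; infer_instance

-- ===== CLAIM (what is proved, stated in full; the proofs are below) =====
def Claim_equal_levels_detect : Prop := ∀ (num_of_values : Int), Dom_levels_detect num_of_values → Spec_levels_detect num_of_values (levels_detect num_of_values)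

-- ===== LEMMAS AND PROOFS =====

-- bit_length is characterised by 2^l ≤ m < 2^(l+1).
theorem bitLength_eq_of_bounds (m l : ℕ) (h1 : 2 ^ l ≤ m) (h2 : m < 2 ^ (l + 1)) :
    PySem.Int.bitLength (m : Int) = l + 1 := by
  have h1le : 1 ≤ 2 ^ l := Nat.one_le_two_pow
  have hm0 : (m : Int) ≠ 0 := by omega
  have hub := PySem.Int.lt_two_pow_bitLength (m : Int)
  have hlb := PySem.Int.two_pow_bitLength_le (m : Int) hm0
  rw [Int.natAbs_natCast] at hub hlb
  set B := PySem.Int.bitLength (m : Int) with hB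
  have hBl : l < B := by
    by_contra hc
    rw [not_lt] at hc
    exact absurd (lt_of_le_of_lt h1 hub) (not_lt.2 (Nat.pow_le_pow_right (by norm_num) hc))
  have hBu : B - 1 ≤ l := by
    by_contra hc
    rw [not_le] at hc
    exact absurd (lt_of_le_of_lt hlb h2) (not_lt.2 (Nat.pow_le_pow_right (by norm_num) hc))
  omega

-- loop invariant: with rest = m - (2^(l+1) - 1) and 2^l ≤ m, the loop computes bit_length m - 1
theorem levelsLoop_eq (k : ℕ) : ∀ (l m : ℕ), m - 2 ^ l ≤ k → 1 ≤ l → 2 ^ l ≤ m →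
    levelsLoop ((m : Int) - (2 ^ (l + 1) - 1)) (l : Int) = (PySem.Int.bitLength (m : Int) : Int) - 1 := by
  induction k with
  | zero =>
    intro l m hk hl hm
    -- m ≤ 2^l, so rest ≤ 0 and the loop stops at l; bit_length m = l + 1
    have hml : m ≤ 2 ^ l := Nat.le_of_sub_eq_zero (Nat.le_zero.mp hk)
    have hmono : (2:ℕ) ^ l ≤ 2 ^ (l + 1) := Nat.pow_le_pow_right (by norm_num) (Nat.le_succ l)
    have hlt : m < 2 ^ (l + 1) := lt_of_le_of_lt hml (Nat.pow_lt_pow_right (by norm_num) (Nat.lt_succ_self l))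
    have hstop : ¬ ((m : Int) - (2 ^ (l + 1) - 1) > 0) := by
      simp only [not_lt]
      have h1 : (m : Int) < (2:Int) ^ (l + 1) := by exact_mod_cast hlt
      linarith
    rw [levelsLoop, dif_neg hstop]
    rw [bitLength_eq_of_bounds m l hm hlt]; push_cast; ring
  | succ k ih =>
    intro l m hk hl hm
    by_cases hgo : (m : Int) - (2 ^ (l + 1) - 1) > 0
    · -- one more iteration
      have hm' : 2 ^ (l + 1) ≤ m := by
        exact_mod_cast (by linarith : (2:Int) ^ (l + 1) ≤ (m : Int))
      rw [levelsLoop, dif_pos hgo]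
      have htn : ((l : Int) + 1).toNat = l + 1 := by omega
      have harg : (m : Int) - (2 ^ (l + 1) - 1) - 2 ^ ((l : Int) + 1).toNat
          = (m : Int) - (2 ^ (l + 1 + 1) - 1) := by
        rw [htn]; ring
      have hcast : (l : Int) + 1 = ((l + 1 : ℕ) : Int) := by push_cast; ring
      rw [harg, hcast]
      apply ih (l + 1) m _ (by omega) hm'
      have h2 : 2 ^ l < 2 ^ (l + 1) := Nat.pow_lt_pow_right (by norm_num) (Nat.lt_succ_self l)
      generalize ha : 2 ^ l = a at hk h2
      generalize hb : 2 ^ (l + 1) = b at h2 hm' ⊢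
      omega
    · -- loop stops: same as the zero case
      have hlt : m < 2 ^ (l + 1) := by
        simp only [not_lt] at hgo
        exact_mod_cast (by linarith : (m : Int) < (2:Int) ^ (l + 1))
      rw [levelsLoop, dif_neg hgo]
      rw [bitLength_eq_of_bounds m l hm hlt]; push_cast; ring

-- ===== VERDICT (by name: the statement is the Claim_ definition above) =====
theorem levels_detect_spec : Claim_equal_levels_detect := by
  intro n _
  unfold Spec_levels_detect levels_detect levels_detect_alt
  by_cases hn : n ≤ 2
  · rw [if_pos hn, levelsLoop, dif_neg (by omega)]
  · rw [if_neg hn]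
    have hm4 : 4 ≤ (n + 1).toNat := by omega
    have hcast : ((n + 1).toNat : Int) = n + 1 := by omega
    have key := levelsLoop_eq ((n + 1).toNat) 1 ((n + 1).toNat) (Nat.sub_le _ _) (le_refl _) (by simp only [pow_one]; omega)
    rw [hcast] at key
    have harg : n + 1 - ((2:Int) ^ (1 + 1) - 1) = n - 2 := by ring
    rw [harg] at key
    norm_num at key ⊢
    exact key
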